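-- pv_equiv track=rewrite | github.com/morrovian/frohmanbracket | Tangela.py | eraseKey
-- ===== SOURCE A (Python) =====
-- def dcopy(x):
--   if (type(x) == list):
--     newx = []
--     for elem in x:
--       if ((type(elem) == list) or (type(elem) == dict)):
--         newx.append(dcopy(elem))
--       else:
--         newx.append(elem)
--     return newx
--   if (type(x) == dict):
--     newx = {}
--     for elem in x:
--       if ((type(x[elem]) == list) or (type(x[elem]) == dict)):
--         newx[elem] = dcopy(x[elem])
--       else:
--         newx[elem] = x[elem]
--     return newx
--   return x
--
-- def eraseKey(strand_overpasses,to_erase):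
--   overstrand = to_erase[0]
--   strand_overpasses_two = dcopy(strand_overpasses)
--   overstrand_overpasses = strand_overpasses[overstrand]
--   for i in range(len(overstrand_overpasses)):
--     if (overstrand_overpasses[i] == [to_erase[1],to_erase[2]]):
--       overstrand_overpasses_two = dcopy(overstrand_overpasses)
--       overstrand_overpasses_two.pop(i)
--       strand_overpasses_two[overstrand] = dcopy(overstrand_overpasses_two)
--       return strand_overpasses_two
-- ===== SOURCE B (Python) =====
-- def eraseKey(strand_overpasses, to_erase):
--   overstrand = to_erase[0]
--   lst = strand_overpasses[overstrand]
--   target = [to_erase[1], to_erase[2]]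
--   if target not in lst:
--     return None
--   i = lst.index(target)
--   return {k: (lst[:i] + lst[i + 1:] if k == overstrand else [list(e) for e in v])
--           for k, v in strand_overpasses.items()}
-- ===== Notes on version B (the rewrite author's own statement) =====
-- stated objective: idiomatic
-- what changed: B replaces A's index-scan followed by three recursive deep copies and an in-place pop with list membership + list.index and a take/drop slice splice inside a single dict comprehension.
-- outside the precondition, e.g. on eraseKey({0: []}, [0]): A returns None, B raises IndexError
import Mathlib
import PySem

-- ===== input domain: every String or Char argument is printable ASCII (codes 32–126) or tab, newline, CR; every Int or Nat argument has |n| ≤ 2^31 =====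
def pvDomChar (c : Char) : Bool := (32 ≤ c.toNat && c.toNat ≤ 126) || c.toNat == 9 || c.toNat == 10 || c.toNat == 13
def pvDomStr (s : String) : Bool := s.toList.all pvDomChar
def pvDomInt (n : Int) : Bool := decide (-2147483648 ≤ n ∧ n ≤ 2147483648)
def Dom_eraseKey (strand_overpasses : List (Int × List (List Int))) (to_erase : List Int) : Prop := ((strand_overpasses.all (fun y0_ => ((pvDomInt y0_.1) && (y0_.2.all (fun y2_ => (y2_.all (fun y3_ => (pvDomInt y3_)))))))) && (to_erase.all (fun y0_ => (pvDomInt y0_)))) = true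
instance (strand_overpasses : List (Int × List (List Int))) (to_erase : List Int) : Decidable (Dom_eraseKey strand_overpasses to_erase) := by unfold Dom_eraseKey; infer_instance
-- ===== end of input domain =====

-- B replaces A's find-index-then-three-deep-copies-and-pop with list.index plus a slice-splice
-- inside one dict comprehension (idiomatic; return value only — neither program mutates its input).

-- ===== PORT A =====
-- dcopy specialised to the three shapes it is applied to (list of ints / list of lists / dict):
-- inner elements are ints, appended as-is; list/dict elements are recursively copied, as in A.
def dcopyInner (x : List Int) : List Int :=
  x.foldl (fun acc e => acc ++ [e]) []

def dcopyLL (x : List (List Int)) : List (List Int) :=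
  x.foldl (fun acc e => acc ++ [dcopyInner e]) []

def dcopyD (x : List (Int × List (List Int))) : List (Int × List (List Int)) :=
  x.foldl (fun acc p => acc ++ [(p.1, dcopyLL p.2)]) []

-- A's `for i in range(len(overstrand_overpasses))` loop, as index recursion from i
def eraseLoop (sp2 : List (Int × List (List Int))) (overstrand : Int) (te : List Int)
    (ovl : List (List Int)) (i : Nat) : Option (List (Int × List (List Int))) :=
  if h : i < ovl.length then
    match PySem.List.pyGet? te 1, PySem.List.pyGet? te 2 with
    | some t1, some t2 =>
      if ovl[i] = [t1, t2] then
        -- overstrand_overpasses_two = dcopy(...); .pop(i); assign dcopy of it; return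
        match PySem.List.pop? (dcopyLL ovl) (i : Int) with
        | some r => some (((PySem.Dict.mk sp2).insert overstrand (dcopyLL r.2)).items)
        | none => none          -- unreachable: i < len
      else eraseLoop sp2 overstrand te ovl (i + 1)
    | _, _ => none              -- IndexError on to_erase[1]/to_erase[2], outside Pre_
  else none                     -- loop falls through: Python returns None
termination_by ovl.length - i

def eraseKey (strand_overpasses : List (Int × List (List Int))) (to_erase : List Int) : Option (List (Int × List (List Int))) :=
  match PySem.List.pyGet? to_erase 0 with
  | none => none                -- IndexError, outside Pre_
  | some overstrand =>
    let strand_overpasses_two := dcopyD strand_overpasses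
    match (PySem.Dict.mk strand_overpasses).get? overstrand with
    | none => none              -- KeyError, outside Pre_
    | some overstrand_overpasses =>
      eraseLoop strand_overpasses_two overstrand to_erase overstrand_overpasses 0

-- ===== PORT B =====
def eraseKey_alt (strand_overpasses : List (Int × List (List Int))) (to_erase : List Int) : Option (List (Int × List (List Int))) :=
  match PySem.List.pyGet? to_erase 0 with
  | none => none                -- IndexError, outside Pre_
  | some overstrand =>
    match (PySem.Dict.mk strand_overpasses).get? overstrand with
    | none => none              -- KeyError, outside Pre_
    | some lst =>
      match PySem.List.pyGet? to_erase 1, PySem.List.pyGet? to_erase 2 with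
      | some t1, some t2 =>
        let target := [t1, t2]
        if target ∈ lst then
          match PySem.List.index? lst target with
          | some i =>
            -- dict comprehension over the items (keys distinct under Pre_): map each pair
            some (strand_overpasses.map (fun p =>
              if p.1 = overstrand then
                (p.1, PySem.List.slice lst none (some (i : Int)) ++
                      PySem.List.slice lst (some ((i : Int) + 1)) none)
              else (p.1, p.2.map (fun e => e))))
          | none => none        -- unreachable: target ∈ lst
        else none
      | _, _ => none            -- IndexError, outside Pre_

-- ===== PRECONDITION & SPEC =====
-- Pre_ excludes: to_erase shorter than 3 (A raises IndexError whenever the overstrand's list is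
-- non-empty; when that list is empty A still returns a value, a corner B's eager unpacking raises
-- on — see cites); to_erase[0] not a key (KeyError); and association lists with duplicate keys,
-- which do not represent a Python dict (the dict built from them collapses duplicates).
def Pre_eraseKey (strand_overpasses : List (Int × List (List Int))) (to_erase : List Int) : Prop :=
  3 ≤ to_erase.length ∧ (strand_overpasses.map Prod.fst).Nodup ∧
    to_erase.headD 0 ∈ strand_overpasses.map Prod.fst
instance (strand_overpasses : List (Int × List (List Int))) (to_erase : List Int) : Decidable (Pre_eraseKey strand_overpasses to_erase) := by unfold Pre_eraseKey; infer_instance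

def pvWitness_eraseKey : (List (Int × List (List Int))) × List Int := ([(0, [[1, 2]])], [0, 1, 2])

def Spec_eraseKey (strand_overpasses : List (Int × List (List Int))) (to_erase : List Int) (out : Option (List (Int × List (List Int)))) : Prop := out = eraseKey_alt strand_overpasses to_erase
instance (strand_overpasses : List (Int × List (List Int))) (to_erase : List Int) (out : Option (List (Int × List (List Int)))) : Decidable (Spec_eraseKey strand_overpasses to_erase out) := by unfold Spec_eraseKey; infer_instance

-- ===== CLAIM =====
def Claim_equal_eraseKey : Prop := ∀ (strand_overpasses : List (Int × List (List Int))) (to_erase : List Int), Dom_eraseKey strand_overpasses to_erase → Pre_eraseKey strand_overpasses to_erase → Spec_eraseKey strand_overpasses to_erase (eraseKey strand_overpasses to_erase)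

-- ===== LEMMAS AND PROOFS =====
theorem dcopyInner_id (x : List Int) : dcopyInner x = x := by
  rw [dcopyInner, PySem.List.foldl_append_singleton]; rfl

theorem dcopyLL_id (x : List (List Int)) : dcopyLL x = x := by
  rw [dcopyLL, PySem.List.foldl_append_singleton_eq_map]
  calc List.map dcopyInner x = List.map id x := List.map_congr_left (fun a _ => dcopyInner_id a)
    _ = x := List.map_id x

theorem dcopyD_id (x : List (Int × List (List Int))) : dcopyD x = x := by
  rw [dcopyD, PySem.List.foldl_append_singleton_eq_map]
  calc List.map (fun p => (p.1, dcopyLL p.2)) x = List.map id x :=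
        List.map_congr_left (fun a _ => by simp [dcopyLL_id])
    _ = x := List.map_id x

theorem eraseLoop_eq (sp2 : List (Int × List (List Int))) (k : Int) (te : List Int)
    (t1 t2 : Int) (h1 : PySem.List.pyGet? te 1 = some t1) (h2 : PySem.List.pyGet? te 2 = some t2)
    (ovl : List (List Int)) (i : Nat) :
    eraseLoop sp2 k te ovl i =
      (PySem.List.index? (ovl.drop i) [t1, t2]).map
        (fun j => ((PySem.Dict.mk sp2).insert k (ovl.eraseIdx (i + j))).items) := by
  have H : ∀ n i, ovl.length - i ≤ n → eraseLoop sp2 k te ovl i =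
      (PySem.List.index? (ovl.drop i) [t1, t2]).map
        (fun j => ((PySem.Dict.mk sp2).insert k (ovl.eraseIdx (i + j))).items) := by
    intro n
    induction n with
    | zero =>
      intro i hi
      have hle : ovl.length ≤ i := by omega
      rw [eraseLoop]
      simp [Nat.not_lt.mpr hle, List.drop_eq_nil_of_le hle]
    | succ n ih =>
      intro i hi
      rw [eraseLoop]
      by_cases h : i < ovl.length
      · simp only [h, dif_pos, h1, h2]
        rw [List.drop_eq_getElem_cons h, dcopyLL_id]
        by_cases he : ovl[i] = [t1, t2]
        · rw [if_pos he, PySem.List.pop?_natCast ovl i h, he,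
              PySem.List.index?_cons_self]
          simp [dcopyLL_id]
        · rw [if_neg he, ih (i + 1) (by omega),
              PySem.List.index?_cons_of_ne _ he]
          cases PySem.List.index? (ovl.drop (i + 1)) [t1, t2] with
          | none => simp
          | some j =>
            simp only [Option.map_some]
            have : i + 1 + j = i + (j + 1) := by omega
            rw [this]
      · have hle : ovl.length ≤ i := by omega
        simp [h, List.drop_eq_nil_of_le hle]
  exact H (ovl.length - i) i (Nat.le_refl _)

-- ===== VERDICT =====
theorem eraseKey_spec : Claim_equal_eraseKey := by
  intro sp te _hdom hpre
  obtain ⟨hlen, hnd, hmem⟩ := hpre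
  match te, hlen with
  | t0 :: t1 :: t2 :: rest, _ =>
  have h0 : PySem.List.pyGet? (t0 :: t1 :: t2 :: rest) 0 = some t0 :=
    PySem.List.pyGet?_zero_cons _ _
  have h1 : PySem.List.pyGet? (t0 :: t1 :: t2 :: rest) 1 = some t1 := by
    rw [show (1 : Int) = ((1 : Nat) : Int) from rfl,
        PySem.List.pyGet?_ofNat _ 1 (by simp)]
    rfl
  have h2 : PySem.List.pyGet? (t0 :: t1 :: t2 :: rest) 2 = some t2 := by
    rw [show (2 : Int) = ((2 : Nat) : Int) from rfl,
        PySem.List.pyGet?_ofNat _ 2 (by simp)]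
    rfl
  have hmem' : t0 ∈ (PySem.Dict.mk sp).keys := by
    rw [PySem.Dict.keys_mk]; simpa using hmem
  have hcont : (PySem.Dict.mk sp).contains t0 = true :=
    (PySem.Dict.contains_iff_mem_keys _ _).mpr hmem'
  have hsome : ((PySem.Dict.mk sp).get? t0).isSome := by
    rw [PySem.Dict.contains_eq_isSome_get?] at hcont; exact hcont
  obtain ⟨lst, hg⟩ := Option.isSome_iff_exists.mp hsome
  unfold Spec_eraseKey eraseKey eraseKey_alt
  rw [h0]; dsimp only
  rw [hg]; dsimp only
  rw [h1, h2]; dsimp only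
  rw [dcopyD_id,
      eraseLoop_eq sp t0 (t0 :: t1 :: t2 :: rest) t1 t2 h1 h2 lst 0,
      List.drop_zero]
  by_cases hm : [t1, t2] ∈ lst
  · rw [if_pos hm]
    obtain ⟨i, hidx⟩ := Option.isSome_iff_exists.mp
      ((PySem.List.index?_isSome_iff lst [t1, t2]).mpr hm)
    rw [hidx]
    simp only [Option.map_some, Nat.zero_add, Option.some.injEq]
    rw [PySem.Dict.items_insert_of_contains _ _ hcont]
    show List.map _ sp = List.map _ sp
    apply List.map_congr_left
    intro p _hp
    by_cases hk : p.1 = t0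
    · rw [if_pos (by exact beq_iff_eq.mpr hk), if_pos hk,
          PySem.List.slice_to_natCast,
          show ((i : Int) + 1) = (((i + 1 : Nat) : Int)) by push_cast; ring,
          PySem.List.slice_from_natCast,
          List.eraseIdx_eq_take_drop_succ, hk]
    · rw [if_neg (by simpa using hk), if_neg hk]
      simp
  · rw [if_neg hm, (PySem.List.index?_eq_none_iff lst [t1, t2]).mpr hm]
    rfl
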